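-- pv_equiv track=rewrite | github.com/YuZhu1218/Codes-for-Bioinformatics | Week1.py | FrequencyTable
-- ===== SOURCE A (Python) =====
-- def FrequencyTable(Text, k):
--     freqMap={}
--     n=len(Text)
--     for i in range(n-k):
--         Pattern = Text[i:k+i]
--         if Pattern not in freqMap:
--             freqMap[Pattern] = 1
--         else:
--            freqMap[Pattern] = freqMap[Pattern]+1
--     return freqMap
-- ===== SOURCE B (Python) =====
-- def FrequencyTable(Text, k):
--     kmers = [Text[i:i+k] for i in range(len(Text) - k)]
--     return {p: kmers.count(p) for p in dict.fromkeys(kmers)}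
-- ===== Notes on version B (the rewrite author's own statement) =====
-- stated objective: alternative
-- what changed: Replaces A's incremental dict-counting loop with a declarative pipeline: materialise the k-mer list once, dedup it preserving first occurrence, and count each distinct k-mer directly.
import Mathlib
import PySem

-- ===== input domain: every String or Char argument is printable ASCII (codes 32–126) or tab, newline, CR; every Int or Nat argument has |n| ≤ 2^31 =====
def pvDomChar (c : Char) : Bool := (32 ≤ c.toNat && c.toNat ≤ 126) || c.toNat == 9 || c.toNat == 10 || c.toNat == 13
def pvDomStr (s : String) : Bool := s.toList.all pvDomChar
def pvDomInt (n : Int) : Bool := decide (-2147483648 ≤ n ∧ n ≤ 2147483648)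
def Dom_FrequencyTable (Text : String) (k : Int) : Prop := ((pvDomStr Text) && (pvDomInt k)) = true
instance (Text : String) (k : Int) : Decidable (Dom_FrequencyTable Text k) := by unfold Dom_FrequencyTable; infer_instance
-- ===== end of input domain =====

-- B replaces A's incremental dict-counting loop with a build-dedup-count pipeline (alternative decomposition, same return value).

-- ===== PORT A =====
def FrequencyTable (Text : String) (k : Int) : List (String × Int) :=
  let n : Int := PySem.Str.len Text
  ((PySem.List.pyRange 0 (n - k) 1).foldl (fun d i =>
      let Pattern := PySem.Str.slice Text (some i) (some (k + i))
      if d.contains Pattern = false then d.insert Pattern 1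
      else d.insert Pattern (d.getD Pattern 0 + 1)) PySem.Dict.empty).items

-- ===== PORT B =====
def FrequencyTable_alt (Text : String) (k : Int) : List (String × Int) :=
  let kmers := (PySem.List.pyRange 0 (PySem.Str.len Text - k) 1).map
      (fun i => PySem.Str.slice Text (some i) (some (i + k)))
  (PySem.List.dedup kmers).map (fun p => (p, (PySem.List.count kmers p : Int)))

-- ===== PRECONDITION & SPEC =====
def Spec_FrequencyTable (Text : String) (k : Int) (out : List (String × Int)) : Prop := out = FrequencyTable_alt Text k
instance (Text : String) (k : Int) (out : List (String × Int)) : Decidable (Spec_FrequencyTable Text k out) := by unfold Spec_FrequencyTable; infer_instance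

-- ===== CLAIM (what is proved, stated in full; the proofs are below) =====
def Claim_equal_FrequencyTable : Prop := ∀ (Text : String) (k : Int), Dom_FrequencyTable Text k → Spec_FrequencyTable Text k (FrequencyTable Text k)

-- ===== LEMMAS AND PROOFS =====

-- A's branch 'new key ↦ 1, old key ↦ old+1' is exactly 'key ↦ getD 0 + 1'
theorem pv_step_eq (d : PySem.Dict String Int) (x : String) :
    (if d.contains x = false then d.insert x 1 else d.insert x (d.getD x 0 + 1))
      = d.insert x (d.getD x 0 + 1) := by
  by_cases h : d.contains x = false
  · rw [if_pos h, PySem.Dict.getD_of_not_contains d (0 : Int) h]; norm_num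
  · simp [h]

theorem pv_fold (l : List Int) (g : Int → String) :
    l.foldl (fun d i => d.insert (g i) (d.getD (g i) 0 + 1)) PySem.Dict.empty
      = PySem.Dict.counter (l.map g) := by
  rw [← PySem.Dict.foldl_insert_getD_add_one_eq_counter, List.foldl_map]

-- ===== VERDICT (by name: the statement is the Claim_ definition above) =====
theorem FrequencyTable_spec : Claim_equal_FrequencyTable := by
  intro Text k _
  unfold Spec_FrequencyTable FrequencyTable FrequencyTable_alt
  have hcomm : ∀ i : Int, PySem.Str.slice Text (some i) (some (i + k))
      = PySem.Str.slice Text (some i) (some (k + i)) := by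
    intro i; rw [Int.add_comm]
  simp only [hcomm]
  simp only [pv_step_eq]
  rw [pv_fold _ (fun i => PySem.Str.slice Text (some i) (some (k + i))), PySem.Dict.items_counter]
  simp [PySem.List.dedup_eq_ofList, PySem.List.count_eq]
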